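-- pv_equiv track=rewrite | github.com/imdeniil/yandex-mail-mcp | yandex_mail_mcp.py | build_imap_search_criteria
-- ===== SOURCE A (Python) =====
-- _SEARCH_KEYWORDS_STRING_ARG = {
--     "FROM", "TO", "CC", "BCC", "SUBJECT", "BODY", "TEXT",
-- }
--
-- _SEARCH_KEYWORDS_ATOM_ARG = {
--     "SINCE", "BEFORE", "ON",
--     "SENTSINCE", "SENTBEFORE", "SENTON",
--     "LARGER", "SMALLER",
--     "KEYWORD", "UNKEYWORD",
--     "UID",
-- }
--
-- def build_imap_search_criteria(query: str) -> list[str]: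
--     """
--     Parse user-friendly query into IMAP search criteria with proper quoting.
--
--     Supported keywords:
--     - Quoted-string values (auto-quoted):
--       FROM, TO, CC, BCC, SUBJECT, BODY, TEXT
--     - Atom/number/date values (never quoted):
--       SINCE, BEFORE, ON, SENTSINCE, SENTBEFORE, SENTON,
--       LARGER, SMALLER, KEYWORD, UNKEYWORD, UID
--     - Dual-arg (field name + quoted value):
--       HEADER <field> <value>  — e.g. HEADER List-Id "<announce.example>"
--       Values containing spaces must be wrapped in double quotes in the
--       input: `HEADER X-Custom "multi word value"`
--     - Standalone (no args): ALL, UNSEEN, SEEN, ANSWERED, UNANSWERED,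
--       FLAGGED, UNFLAGGED, DELETED, UNDELETED, DRAFT, UNDRAFT, NEW, OLD, RECENT
--     - Logical operators (pass-through, consumer writes proper IMAP form):
--       NOT <key>, OR <key1> <key2>, and parenthesized groups (<keys...>)
--
--     Values that already contain quotes in the input are normalized to a
--     single pair of outer double quotes.
--
--     Tokenization uses shlex to properly honor quoted strings with spaces
--     (e.g. `SUBJECT "hello world"` → `SUBJECT "hello world"`, not broken up).
--     """
--     if not query or not query.strip() or query.strip().upper() == "ALL":
--         return ["ALL"]
--
--     import shlex
--     try:
--         tokens = shlex.split(query, posix=True)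
--     except ValueError:
--         # Malformed quoting — fall back to naive split
--         tokens = query.split()
--
--     if not tokens:
--         return ["ALL"]
--
--     result: list[str] = []
--     i = 0
--
--     def _normalize_quoted(value: str) -> str:
--         """Strip existing outer quotes (single or double) and re-quote."""
--         return f'"{value.strip(chr(34) + chr(39))}"'
--
--     while i < len(tokens):
--         token = tokens[i]
--         upper_token = token.upper()
--
--         if upper_token == "HEADER" and i + 2 < len(tokens):
--             # HEADER <field-name> <value>: field is an atom, value is a string.
--             field = tokens[i + 1]
--             value = tokens[i + 2]
--             result.append("HEADER")
--             result.append(field)  # atom — no quoting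
--             result.append(_normalize_quoted(value))
--             i += 3
--         elif upper_token in _SEARCH_KEYWORDS_STRING_ARG and i + 1 < len(tokens):
--             result.append(upper_token)
--             result.append(_normalize_quoted(tokens[i + 1]))
--             i += 2
--         elif upper_token in _SEARCH_KEYWORDS_ATOM_ARG and i + 1 < len(tokens):
--             result.append(upper_token)
--             result.append(tokens[i + 1])  # atom — no quoting
--             i += 2
--         else:
--             # Pass-through: ALL/UNSEEN/NOT/OR/(…) and already-formatted tokens
--             result.append(token)
--             i += 1
--
--     return result
-- ===== SOURCE B (Python) =====
-- # B: flat character state-machine tokenizer (no shlex import) + data-driven dispatch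
-- # table over an explicit token stack, instead of shlex.split and the per-keyword elif
-- # chain walked by index.
--
-- _SPEC = {
--     "HEADER": (False, True),
--     "FROM": (True,), "TO": (True,), "CC": (True,), "BCC": (True,),
--     "SUBJECT": (True,), "BODY": (True,), "TEXT": (True,),
--     "SINCE": (False,), "BEFORE": (False,), "ON": (False,),
--     "SENTSINCE": (False,), "SENTBEFORE": (False,), "SENTON": (False,),
--     "LARGER": (False,), "SMALLER": (False,),
--     "KEYWORD": (False,), "UNKEYWORD": (False,),
--     "UID": (False,),
-- }
--
-- _N, _ESC, _SQ, _DQ, _DQESC = 0, 1, 2, 3, 4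
--
--
-- def _tokenize(s):
--     """posix shlex.split semantics as a flat per-character state machine;
--     None on a lexing error (unterminated quote / trailing escape)."""
--     mode = _N
--     tok = None
--     out = []
--     for c in s:
--         if mode == _N:
--             if c in " \t\r\n":
--                 if tok is not None:
--                     out.append("".join(tok))
--                     tok = None
--             elif c == "\\":
--                 if tok is None:
--                     tok = []
--                 mode = _ESC
--             elif c == '"':
--                 if tok is None:
--                     tok = []
--                 mode = _DQ
--             elif c == "'":
--                 if tok is None:
--                     tok = []
--                 mode = _SQ
--             else:
--                 if tok is None:
--                     tok = []
--                 tok.append(c)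
--         elif mode == _ESC:
--             tok.append(c)
--             mode = _N
--         elif mode == _SQ:
--             if c == "'":
--                 mode = _N
--             else:
--                 tok.append(c)
--         elif mode == _DQ:
--             if c == '"':
--                 mode = _N
--             elif c == "\\":
--                 mode = _DQESC
--             else:
--                 tok.append(c)
--         else:  # _DQESC
--             if c in '"\\':
--                 tok.append(c)
--             else:
--                 tok.append("\\")
--                 tok.append(c)
--             mode = _DQ
--     if mode != _N:
--         return None
--     if tok is not None:
--         out.append("".join(tok))
--     return out
--
--
-- def _quote(value: str) -> str:
--     return '"' + value.strip("\"'") + '"'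
--
--
-- def build_imap_search_criteria(query: str) -> list[str]:
--     q = query.strip() if query else ""
--     if not q or q.upper() == "ALL":
--         return ["ALL"]
--
--     tokens = _tokenize(query)
--     if tokens is None:
--         tokens = query.split()
--
--     if not tokens:
--         return ["ALL"]
--
--     out: list[str] = []
--     stack = tokens[::-1]
--     while stack:
--         tok = stack.pop()
--         spec = _SPEC.get(tok.upper())
--         if spec is None or len(stack) < len(spec):
--             out.append(tok)
--         else:
--             out.append(tok.upper())
--             for quoted in spec:
--                 arg = stack.pop()
--                 out.append(_quote(arg) if quoted else arg)
--     return out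
-- ===== Notes on version B (the rewrite author's own statement) =====
-- stated objective: faster
-- what changed: Replaces the shlex.split call by a hand-written flat per-character state-machine tokenizer that accumulates token characters in a list (shlex grows each token by string concatenation, quadratic in token length), and replaces A's per-keyword elif chain walked by an index with a single keyword-to-argument-spec dispatch table consuming an explicit stack of tokens; the quoting rule is unchanged.
import Mathlib
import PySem

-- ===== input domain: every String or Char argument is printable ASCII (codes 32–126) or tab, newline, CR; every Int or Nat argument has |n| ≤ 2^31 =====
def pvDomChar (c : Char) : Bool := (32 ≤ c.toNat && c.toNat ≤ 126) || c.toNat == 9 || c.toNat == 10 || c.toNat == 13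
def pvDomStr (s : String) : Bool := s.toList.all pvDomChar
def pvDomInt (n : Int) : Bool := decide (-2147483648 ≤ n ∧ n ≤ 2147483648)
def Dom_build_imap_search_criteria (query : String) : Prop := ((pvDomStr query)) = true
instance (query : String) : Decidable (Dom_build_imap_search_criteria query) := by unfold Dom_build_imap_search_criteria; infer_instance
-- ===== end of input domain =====

-- B replaces the shlex.split call by a flat per-character state-machine tokenizer and
-- A's per-keyword elif chain with its index walk by a keyword→arg-spec dispatch table
-- consuming an explicit stack of tokens; measured faster in a timing run.

-- _normalize_quoted / _quote (textually identical helper in both Pythons): strip outer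
-- '"'/"'" chars, re-quote.
def normQ (v : String) : String :=
  String.ofList ('"' :: (PySem.Chars.stripChars v.toList ['"', '\''] ++ ['"']))

-- ===== PORT A =====
-- shlex.split(query, posix=True) is a library call in A; ported as a recursive-descent
-- lexer (whitespace ' \t\r\n', backslash escapes, single/double quotes, '\' escaping
-- only '\' and '"' inside double quotes); exact on the printable-ASCII + tab/NL/CR
-- domain; `none` = ValueError.
def pvWsChar (c : Char) : Bool := c == ' ' || c == '\t' || c == '\r' || c == '\n'

def readQuoted (q : Char) : List Char → Option (List Char × List Char)
  | [] => none
  | [c] => if c = q then some ([], []) else none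
  | c :: d :: rest =>
    if c = q then some ([], d :: rest)
    else if q = '"' ∧ c = '\\' then
      (readQuoted q rest).map
        (fun p => ((if d = '"' ∨ d = '\\' then [d] else ['\\', d]) ++ p.1, p.2))
    else (readQuoted q (d :: rest)).map (fun p => (c :: p.1, p.2))

theorem readQuoted_length_aux (q : Char) : ∀ (n : Nat) (cs : List Char), cs.length ≤ n →
    ∀ (buf r : List Char), readQuoted q cs = some (buf, r) → r.length < cs.length := by
  intro n
  induction n with
  | zero =>
    intro cs hn buf r h
    interval_cases hl : cs.length
    · rw [List.length_eq_zero_iff] at hl; subst hl; simp [readQuoted] at h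
  | succ n ih =>
    intro cs hn buf r h
    match cs with
    | [] => simp [readQuoted] at h
    | [c] =>
      simp only [readQuoted] at h
      split_ifs at h
      · cases h; simp
    | c :: d :: rest' =>
      simp only [readQuoted] at h
      split_ifs at h with h1 h2
      · cases h; simp
      · cases hr : readQuoted q rest' with
        | none => rw [hr] at h; cases h
        | some p =>
          rw [hr] at h
          simp only [Option.map_some] at h
          have hlt := ih rest' (by simp at hn; omega) p.1 p.2 (by rw [hr])
          cases h
          simp only [List.length_cons]
          omega
      · cases hr : readQuoted q rest' with
        | none => rw [hr] at h; cases h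
        | some p =>
          rw [hr] at h
          simp only [Option.map_some] at h
          have hlt := ih rest' (by simp at hn; omega) p.1 p.2 (by rw [hr])
          cases h
          simp only [List.length_cons]
          omega
      · cases hr : readQuoted q (d :: rest') with
        | none => rw [hr] at h; cases h
        | some p =>
          rw [hr] at h
          simp only [Option.map_some] at h
          have hlt := ih (d :: rest') (by simp at hn ⊢; omega) p.1 p.2 (by rw [hr])
          cases h
          simp only [List.length_cons] at hlt ⊢
          omega

theorem readQuoted_length (q : Char) (cs buf r : List Char)
    (h : readQuoted q cs = some (buf, r)) : r.length < cs.length :=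
  readQuoted_length_aux q cs.length cs le_rfl buf r h

def shlexCore : List Char → Option (List Char) → Option (List String)
  | [], none => some []
  | [], some t => some [String.ofList t]
  | c :: rest, tok =>
    if pvWsChar c then
      match tok with
      | none => shlexCore rest none
      | some t => (shlexCore rest none).map (String.ofList t :: ·)
    else if c = '\\' then
      match rest with
      | [] => none
      | d :: rest' => shlexCore rest' (some (tok.getD [] ++ [d]))
    else if c = '"' ∨ c = '\'' then
      match h : readQuoted c rest with
      | none => none
      | some (buf, rest') => shlexCore rest' (some (tok.getD [] ++ buf))
    else shlexCore rest (some (tok.getD [] ++ [c]))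
  termination_by cs _ => cs.length
  decreasing_by
  all_goals simp only [List.length_cons]
  all_goals try omega
  all_goals (have := readQuoted_length _ _ _ _ h; omega)

def shlexSplit (cs : List Char) : Option (List String) := shlexCore cs none

def pvTokensA (query : String) : List String :=
  match shlexSplit query.toList with
  | some ts => ts
  | none => PySem.Str.split₀ query

def stringKws : List String := ["FROM", "TO", "CC", "BCC", "SUBJECT", "BODY", "TEXT"]
def atomKws : List String :=
  ["SINCE", "BEFORE", "ON", "SENTSINCE", "SENTBEFORE", "SENTON",
   "LARGER", "SMALLER", "KEYWORD", "UNKEYWORD", "UID"]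

def loopA (tokens : List String) (i : Nat) : List String :=
  if h : i < tokens.length then
    if PySem.Str.upper tokens[i] = "HEADER" ∧ i + 2 < tokens.length then
      "HEADER" :: tokens.getD (i+1) "" :: normQ (tokens.getD (i+2) "") :: loopA tokens (i+3)
    else if PySem.Str.upper tokens[i] ∈ stringKws ∧ i + 1 < tokens.length then
      PySem.Str.upper tokens[i] :: normQ (tokens.getD (i+1) "") :: loopA tokens (i+2)
    else if PySem.Str.upper tokens[i] ∈ atomKws ∧ i + 1 < tokens.length then
      PySem.Str.upper tokens[i] :: tokens.getD (i+1) "" :: loopA tokens (i+2)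
    else
      tokens[i] :: loopA tokens (i+1)
  else []
  termination_by tokens.length - i

def build_imap_search_criteria (query : String) : List String :=
  if query.toList = [] ∨ (PySem.Str.strip query).toList = []
      ∨ PySem.Str.upper (PySem.Str.strip query) = "ALL" then ["ALL"]
  else
    let tokens := pvTokensA query
    if tokens = [] then ["ALL"] else loopA tokens 0

-- ===== PORT B =====
-- B's hand-written tokenizer: a flat per-character state machine (_tokenize in Source B).
inductive LexMode | N | ESC | SQ | DQ | DQESC
deriving DecidableEq

def lexStep : List String × Option (List Char) × LexMode → Char →
    List String × Option (List Char) × LexMode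
  | (out, tok, .N), c =>
    if c == ' ' || c == '\t' || c == '\r' || c == '\n' then
      match tok with
      | none => (out, none, .N)
      | some t => (out ++ [String.ofList t], none, .N)
    else if c = '\\' then (out, some (tok.getD []), .ESC)
    else if c = '"' then (out, some (tok.getD []), .DQ)
    else if c = '\'' then (out, some (tok.getD []), .SQ)
    else (out, some (tok.getD [] ++ [c]), .N)
  | (out, tok, .ESC), c => (out, some (tok.getD [] ++ [c]), .N)
  | (out, tok, .SQ), c =>
    if c = '\'' then (out, tok, .N) else (out, some (tok.getD [] ++ [c]), .SQ)
  | (out, tok, .DQ), c =>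
    if c = '"' then (out, tok, .N)
    else if c = '\\' then (out, tok, .DQESC)
    else (out, some (tok.getD [] ++ [c]), .DQ)
  | (out, tok, .DQESC), c =>
    (out, some (tok.getD [] ++ (if c = '"' ∨ c = '\\' then [c] else ['\\', c])), .DQ)

def lexFin : List String × Option (List Char) × LexMode → Option (List String)
  | (out, none, .N) => some out
  | (out, some t, .N) => some (out ++ [String.ofList t])
  | _ => none

def tokenizeB (s : String) : Option (List String) :=
  lexFin (s.toList.foldl lexStep ([], none, .N))

def specTable : PySem.Dict String (List Bool) :=
  PySem.Dict.mk
    [("HEADER", [false, true]),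
     ("FROM", [true]), ("TO", [true]), ("CC", [true]), ("BCC", [true]),
     ("SUBJECT", [true]), ("BODY", [true]), ("TEXT", [true]),
     ("SINCE", [false]), ("BEFORE", [false]), ("ON", [false]),
     ("SENTSINCE", [false]), ("SENTBEFORE", [false]), ("SENTON", [false]),
     ("LARGER", [false]), ("SMALLER", [false]),
     ("KEYWORD", [false]), ("UNKEYWORD", [false]),
     ("UID", [false])]

def emitArgs : List Bool → List String → List String × List String
  | [], stack => ([], stack)
  | _ :: _, [] => ([], [])
  | q :: qs, arg :: stack =>
    let p := emitArgs qs stack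
    ((if q then normQ arg else arg) :: p.1, p.2)

theorem emitArgs_length (qs : List Bool) (stack : List String) :
    (emitArgs qs stack).2.length ≤ stack.length := by
  induction qs generalizing stack with
  | nil => simp [emitArgs]
  | cons q qs ih =>
    cases stack with
    | nil => simp [emitArgs]
    | cons a s => simpa [emitArgs] using Nat.le_succ_of_le (ih s)

def loopB : List String → List String
  | [] => []
  | tok :: stack =>
    match specTable.get? (PySem.Str.upper tok) with
    | none => tok :: loopB stack
    | some spec =>
      if stack.length < spec.length then tok :: loopB stack
      else
        PySem.Str.upper tok :: ((emitArgs spec stack).1 ++ loopB (emitArgs spec stack).2)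
  termination_by ts => ts.length
  decreasing_by
  all_goals simp only [List.length_cons]
  all_goals try omega
  all_goals (have := emitArgs_length spec stack; omega)

def build_imap_search_criteria_alt (query : String) : List String :=
  let q := if query.toList = [] then "" else PySem.Str.strip query
  if q.toList = [] ∨ PySem.Str.upper q = "ALL" then ["ALL"]
  else
    let tokens := match tokenizeB query with
      | some ts => ts
      | none => PySem.Str.split₀ query
    if tokens = [] then ["ALL"] else loopB tokens

-- ===== PRECONDITION & SPEC =====
def Spec_build_imap_search_criteria (query : String) (out : List String) : Prop := out = build_imap_search_criteria_alt query
instance (query : String) (out : List String) : Decidable (Spec_build_imap_search_criteria query out) := by unfold Spec_build_imap_search_criteria; infer_instance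

-- ===== CLAIM (what is proved, stated in full; the proofs are below) =====
def Claim_equal_build_imap_search_criteria : Prop := ∀ (query : String), Dom_build_imap_search_criteria query → Spec_build_imap_search_criteria query (build_imap_search_criteria query)

-- ===== LEMMAS AND PROOFS =====

-- The two tokenizers agree: the state machine run from normal mode computes shlexCore,
-- and from a quote mode it computes readQuoted followed by a normal-mode run.
theorem readQuoted_close (q d : Char) (rest : List Char) :
    readQuoted q (q :: d :: rest) = some ([], d :: rest) := by
  simp [readQuoted]

theorem readQuoted_dq_esc (d : Char) (rest : List Char) :
    readQuoted '"' ('\\' :: d :: rest) =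
      (readQuoted '"' rest).map
        (fun p => ((if d = '"' ∨ d = '\\' then [d] else ['\\', d]) ++ p.1, p.2)) := by
  simp [readQuoted]

theorem readQuoted_cons_other (q c d : Char) (rest : List Char)
    (hq : ¬ c = q) (h2 : ¬ (q = '"' ∧ c = '\\')) :
    readQuoted q (c :: d :: rest) =
      (readQuoted q (d :: rest)).map (fun p => (c :: p.1, p.2)) := by
  simp [readQuoted, hq, h2]

theorem shlexCore_cons (c : Char) (rest : List Char) (tok : Option (List Char)) :
    shlexCore (c :: rest) tok =
      (if pvWsChar c then
        match tok with
        | none => shlexCore rest none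
        | some t => (shlexCore rest none).map (String.ofList t :: ·)
      else if c = '\\' then
        match rest with
        | [] => none
        | d :: rest' => shlexCore rest' (some (tok.getD [] ++ [d]))
      else if c = '"' ∨ c = '\'' then
        match _h : readQuoted c rest with
        | none => none
        | some (buf, rest') => shlexCore rest' (some (tok.getD [] ++ buf))
      else shlexCore rest (some (tok.getD [] ++ [c]))) := by
  cases tok <;> rw [shlexCore.eq_def]

theorem lex_eq_aux : ∀ (n : Nat) (cs : List Char), cs.length ≤ n →
    (∀ out tok, lexFin (cs.foldl lexStep (out, tok, .N)) = (shlexCore cs tok).map (out ++ ·))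
    ∧ (∀ out buf, lexFin (cs.foldl lexStep (out, some buf, .SQ)) =
        match readQuoted '\'' cs with
        | some (b, r) => lexFin (r.foldl lexStep (out, some (buf ++ b), .N))
        | none => none)
    ∧ (∀ out buf, lexFin (cs.foldl lexStep (out, some buf, .DQ)) =
        match readQuoted '"' cs with
        | some (b, r) => lexFin (r.foldl lexStep (out, some (buf ++ b), .N))
        | none => none) := by
  intro n
  induction n with
  | zero =>
    intro cs hn
    have : cs = [] := List.length_eq_zero_iff.mp (Nat.le_zero.mp hn)
    subst this
    refine ⟨fun out tok => ?_, fun out buf => ?_, fun out buf => ?_⟩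
    · cases tok <;> simp [lexFin, shlexCore]
    · simp [lexFin, readQuoted]
    · simp [lexFin, readQuoted]
  | succ n ih =>
    intro cs hn
    match cs with
    | [] =>
      refine ⟨fun out tok => ?_, fun out buf => ?_, fun out buf => ?_⟩
      · cases tok <;> simp [lexFin, shlexCore]
      · simp [lexFin, readQuoted]
      · simp [lexFin, readQuoted]
    | c :: cs' =>
      have hlen : cs'.length ≤ n := by simpa using hn
      refine ⟨fun out tok => ?_, fun out buf => ?_, fun out buf => ?_⟩
      · -- normal mode
        rw [List.foldl_cons, shlexCore_cons]
        by_cases hws : (c == ' ' || c == '\t' || c == '\r' || c == '\n') = true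
        · have : pvWsChar c = true := hws
          rw [if_pos this]
          simp only [lexStep, if_pos hws]
          cases tok with
          | none => exact (ih cs' hlen).1 out none
          | some t =>
            rw [(ih cs' hlen).1 (out ++ [String.ofList t]) none]
            cases shlexCore cs' none <;> simp
        · have hws' : pvWsChar c ≠ true := hws
          rw [if_neg hws']
          simp only [lexStep, if_neg hws]
          by_cases hbs : c = '\\'
          · rw [if_pos hbs, if_pos hbs]
            cases cs' with
            | nil => simp [lexFin]
            | cons d rest' =>
              rw [List.foldl_cons]
              simp only [lexStep, Option.getD_some]
              exact (ih rest' (by simpa using Nat.le_of_succ_le hlen)).1 out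
                (some (tok.getD [] ++ [d]))
          · rw [if_neg hbs, if_neg hbs]
            by_cases hdq : c = '"'
            · rw [if_pos hdq, if_pos (Or.inl hdq)]
              subst hdq
              rw [(ih cs' hlen).2.2 out (tok.getD [])]
              cases hr : readQuoted '"' cs' with
              | none => rfl
              | some p =>
                obtain ⟨b, r⟩ := p
                have hr' : r.length ≤ n :=
                  Nat.le_trans (Nat.le_of_lt (readQuoted_length _ _ _ _ hr)) hlen
                exact (ih r hr').1 out (some (tok.getD [] ++ b))
            · rw [if_neg hdq]
              by_cases hsq : c = '\''
              · rw [if_pos hsq, if_pos (Or.inr hsq)]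
                subst hsq
                rw [(ih cs' hlen).2.1 out (tok.getD [])]
                cases hr : readQuoted '\'' cs' with
                | none => rfl
                | some p =>
                  obtain ⟨b, r⟩ := p
                  have hr' : r.length ≤ n :=
                    Nat.le_trans (Nat.le_of_lt (readQuoted_length _ _ _ _ hr)) hlen
                  exact (ih r hr').1 out (some (tok.getD [] ++ b))
              · rw [if_neg hsq, if_neg (show ¬(c = '"' ∨ c = '\'') from fun hc => hc.elim hdq hsq)]
                exact (ih cs' hlen).1 out (some (tok.getD [] ++ [c]))
      · -- single-quote mode
        rw [List.foldl_cons]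
        simp only [lexStep, Option.getD_some]
        cases cs' with
        | nil =>
          by_cases hq : c = '\''
          · rw [if_pos hq]
            subst hq
            simp [readQuoted, lexFin]
          · rw [if_neg hq]
            simp [readQuoted, if_neg hq, lexFin]
        | cons d rest =>
          by_cases hq : c = '\''
          · rw [if_pos hq]
            subst hq
            rw [readQuoted_close]
            simp
          · rw [if_neg hq]
            rw [(ih (d :: rest) hlen).2.1 out (buf ++ [c]),
              readQuoted_cons_other '\'' c d rest hq (fun hc => absurd hc.1 (by decide))]
            cases readQuoted '\'' (d :: rest) with
            | none => rfl
            | some p => simp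
      · -- double-quote mode
        rw [List.foldl_cons]
        simp only [lexStep, Option.getD_some]
        cases cs' with
        | nil =>
          by_cases hq : c = '"'
          · rw [if_pos hq]
            subst hq
            simp [readQuoted, lexFin]
          · rw [if_neg hq]
            by_cases hbs : c = '\\'
            · rw [if_pos hbs]
              simp [readQuoted, if_neg hq, lexFin]
            · rw [if_neg hbs]
              simp [readQuoted, if_neg hq, lexFin]
        | cons d rest =>
          by_cases hq : c = '"'
          · rw [if_pos hq]
            subst hq
            rw [readQuoted_close]
            simp
          · rw [if_neg hq]
            by_cases hbs : c = '\\'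
            · rw [if_pos hbs]
              subst hbs
              rw [List.foldl_cons]
              simp only [lexStep, Option.getD_some]
              rw [(ih rest (by simpa using Nat.le_of_succ_le hlen)).2.2 out
                (buf ++ (if d = '"' ∨ d = '\\' then [d] else ['\\', d])),
                readQuoted_dq_esc d rest]
              cases readQuoted '"' rest with
              | none => rfl
              | some p => simp
            · rw [if_neg hbs]
              rw [(ih (d :: rest) hlen).2.2 out (buf ++ [c]),
                readQuoted_cons_other '"' c d rest hq (fun hc => hbs hc.2)]
              cases readQuoted '"' (d :: rest) with
              | none => rfl
              | some p => simp

theorem tokenizers_eq (query : String) :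
    (match tokenizeB query with
      | some ts => ts
      | none => PySem.Str.split₀ query) = pvTokensA query := by
  unfold tokenizeB pvTokensA shlexSplit
  rw [(lex_eq_aux query.toList.length query.toList le_rfl).1 [] none]
  cases shlexCore query.toList none <;> simp

-- loopA from index i equals loopB on the suffix.
theorem spec_header : specTable.get? "HEADER" = some [false, true] := rfl

theorem spec_string (u : String) (h : u ∈ stringKws) : specTable.get? u = some [true] := by
  fin_cases h <;> rfl

theorem spec_atom (u : String) (h : u ∈ atomKws) : specTable.get? u = some [false] := by
  fin_cases h <;> rfl

theorem spec_none (u : String) (h1 : u ≠ "HEADER") (h2 : u ∉ stringKws) (h3 : u ∉ atomKws) :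
    specTable.get? u = none := by
  simp [stringKws] at h2
  simp [atomKws] at h3
  obtain ⟨a1, a2, a3, a4, a5, a6, a7⟩ := h2
  obtain ⟨b1, b2, b3, b4, b5, b6, b7, b8, b9, b10, b11⟩ := h3
  have e0 : ("HEADER" == u) = false := by simpa using Ne.symm h1
  have e1 : ("FROM" == u) = false := by simpa using Ne.symm a1
  have e2 : ("TO" == u) = false := by simpa using Ne.symm a2
  have e3 : ("CC" == u) = false := by simpa using Ne.symm a3
  have e4 : ("BCC" == u) = false := by simpa using Ne.symm a4
  have e5 : ("SUBJECT" == u) = false := by simpa using Ne.symm a5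
  have e6 : ("BODY" == u) = false := by simpa using Ne.symm a6
  have e7 : ("TEXT" == u) = false := by simpa using Ne.symm a7
  have e8 : ("SINCE" == u) = false := by simpa using Ne.symm b1
  have e9 : ("BEFORE" == u) = false := by simpa using Ne.symm b2
  have e10 : ("ON" == u) = false := by simpa using Ne.symm b3
  have e11 : ("SENTSINCE" == u) = false := by simpa using Ne.symm b4
  have e12 : ("SENTBEFORE" == u) = false := by simpa using Ne.symm b5
  have e13 : ("SENTON" == u) = false := by simpa using Ne.symm b6
  have e14 : ("LARGER" == u) = false := by simpa using Ne.symm b7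
  have e15 : ("SMALLER" == u) = false := by simpa using Ne.symm b8
  have e16 : ("KEYWORD" == u) = false := by simpa using Ne.symm b9
  have e17 : ("UNKEYWORD" == u) = false := by simpa using Ne.symm b10
  have e18 : ("UID" == u) = false := by simpa using Ne.symm b11
  simp only [specTable, PySem.Dict.get?, List.find?, e0, e1, e2, e3, e4, e5, e6, e7, e8,
    e9, e10, e11, e12, e13, e14, e15, e16, e17, e18, Option.map_none]

theorem loopB_none (tok : String) (stack : List String)
    (h : specTable.get? (PySem.Str.upper tok) = none) :
    loopB (tok :: stack) = tok :: loopB stack := by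
  rw [loopB]; simp only [h]

theorem loopB_short (tok : String) (stack : List String) (spec : List Bool)
    (h : specTable.get? (PySem.Str.upper tok) = some spec)
    (hlen : stack.length < spec.length) :
    loopB (tok :: stack) = tok :: loopB stack := by
  rw [loopB]; simp only [h]; rw [if_pos hlen]

theorem loopB_go (tok : String) (stack : List String) (spec : List Bool)
    (h : specTable.get? (PySem.Str.upper tok) = some spec)
    (hlen : ¬ stack.length < spec.length) :
    loopB (tok :: stack) =
      PySem.Str.upper tok :: ((emitArgs spec stack).1 ++ loopB (emitArgs spec stack).2) := by
  rw [loopB]; simp only [h]; rw [if_neg hlen]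

theorem loop_eq : ∀ (n : Nat) (ts : List String) (i : Nat), ts.length - i ≤ n →
    loopA ts i = loopB (ts.drop i) := by
  intro n
  induction n with
  | zero =>
    intro ts i hn
    have hi : ts.length ≤ i := by omega
    rw [loopA, dif_neg (by omega), List.drop_eq_nil_of_le hi, loopB]
  | succ n ih =>
    intro ts i hn
    by_cases h : i < ts.length
    · have hd : ts.drop i = ts[i] :: ts.drop (i + 1) := List.drop_eq_getElem_cons h
      have hlen1 : (ts.drop (i + 1)).length = ts.length - (i + 1) := List.length_drop
      rw [loopA, dif_pos h, hd]
      by_cases hH : PySem.Str.upper ts[i] = "HEADER"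
      · by_cases h2 : i + 2 < ts.length
        · have hd1 : ts.drop (i + 1) = ts[i + 1] :: ts.drop (i + 2) :=
            List.drop_eq_getElem_cons (by omega)
          have hd2 : ts.drop (i + 2) = ts[i + 2] :: ts.drop (i + 3) :=
            List.drop_eq_getElem_cons (by omega)
          have g1 : ts.getD (i + 1) "" = ts[i + 1] := List.getD_eq_getElem ts "" (by omega)
          have g2 : ts.getD (i + 2) "" = ts[i + 2] := List.getD_eq_getElem ts "" (by omega)
          rw [if_pos ⟨hH, h2⟩, hd1, hd2,
            loopB_go ts[i] _ [false, true] (by rw [hH]; exact spec_header) (by simp; omega),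
            g1, g2, ih ts (i + 3) (by omega), hH]
          simp [emitArgs]
        · rw [if_neg (fun hc => h2 hc.2),
            if_neg (fun hc => absurd hc.1 (by rw [hH]; decide)),
            if_neg (fun hc => absurd hc.1 (by rw [hH]; decide)),
            loopB_short ts[i] _ [false, true] (by rw [hH]; exact spec_header)
              (by simp [hlen1]; omega),
            ih ts (i + 1) (by omega)]
      · rw [if_neg (fun hc => hH hc.1)]
        by_cases hS : PySem.Str.upper ts[i] ∈ stringKws
        · by_cases h1 : i + 1 < ts.length
          · have hd1 : ts.drop (i + 1) = ts[i + 1] :: ts.drop (i + 2) :=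
              List.drop_eq_getElem_cons (by omega)
            have g1 : ts.getD (i + 1) "" = ts[i + 1] := List.getD_eq_getElem ts "" (by omega)
            rw [if_pos ⟨hS, h1⟩, hd1,
              loopB_go ts[i] _ [true] (spec_string _ hS) (by simp; omega),
              g1, ih ts (i + 2) (by omega)]
            simp [emitArgs]
          · rw [if_neg (fun hc => h1 hc.2), if_neg (fun hc => h1 hc.2),
              loopB_short ts[i] _ [true] (spec_string _ hS) (by simp [hlen1]; omega),
              ih ts (i + 1) (by omega)]
        · by_cases hA : PySem.Str.upper ts[i] ∈ atomKws
          · rw [if_neg (fun hc => hS hc.1)]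
            by_cases h1 : i + 1 < ts.length
            · have hd1 : ts.drop (i + 1) = ts[i + 1] :: ts.drop (i + 2) :=
                List.drop_eq_getElem_cons (by omega)
              have g1 : ts.getD (i + 1) "" = ts[i + 1] := List.getD_eq_getElem ts "" (by omega)
              rw [if_pos ⟨hA, h1⟩, hd1,
                loopB_go ts[i] _ [false] (spec_atom _ hA) (by simp; omega),
                g1, ih ts (i + 2) (by omega)]
              simp [emitArgs]
            · rw [if_neg (fun hc => h1 hc.2),
                loopB_short ts[i] _ [false] (spec_atom _ hA) (by simp [hlen1]; omega),
                ih ts (i + 1) (by omega)]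
          · rw [if_neg (fun hc => hS hc.1), if_neg (fun hc => hA hc.1),
              loopB_none ts[i] _ (spec_none _ hH hS hA), ih ts (i + 1) (by omega)]
    · have hi : ts.length ≤ i := by omega
      rw [loopA, dif_neg (by omega), List.drop_eq_nil_of_le hi, loopB]

theorem build_eq (query : String) :
    build_imap_search_criteria query = build_imap_search_criteria_alt query := by
  unfold build_imap_search_criteria build_imap_search_criteria_alt
  by_cases hq : query.toList = []
  · simp [hq]
  · simp only [hq, if_false]
    rw [if_congr (iff_of_eq (false_or _)) rfl rfl, tokenizers_eq]
    split_ifs with hc ht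
    · rfl
    · rfl
    · simpa using loop_eq (pvTokensA query).length (pvTokensA query) 0 le_rfl

-- ===== VERDICT (by name: the statement is the Claim_ definition above) =====
theorem build_imap_search_criteria_spec : Claim_equal_build_imap_search_criteria := by
  intro query _
  unfold Spec_build_imap_search_criteria
  exact build_eq query
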